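-- pv_equiv track=rewrite | github.com/dolag233/Dolag-Houdini-Toolset | python/python2.7libs/Dolag/_pathutils.py | getVersionNum
-- ===== SOURCE A (Python) =====
-- def getVersionNum(filename):
--     if not isinstance(filename, str):
--         return None
--
--     number = []
--     for i in range(len(filename)):
--         char = filename[-i - 1]
--         if char.isdigit():
--             number.append(int(char))
--
--         else:
--             if i == 0:
--                 return None
--
--             break
--
--     number.reverse()
--     return number
-- ===== SOURCE B (Python) =====
-- def getVersionNum(filename):
--     if not isinstance(filename, str):
--         return None
--
--     buf = []
--     for ch in filename:
--         if ch.isdigit():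
--             buf.append(int(ch))
--         else:
--             buf = []
--     return buf or None
-- ===== Notes on version B (the rewrite author's own statement) =====
-- stated objective: simpler
-- what changed: Replaces the backward indexed scan (negative indices, early break, final reverse) with a single forward pass that resets a digit buffer at each non-digit, so the trailing digit run is already in order.
-- intended difference: On the empty string A returns [] (its loop never runs) although every other string without a trailing digit yields None; B uniformly returns None whenever there is no trailing digit run, the intended signal that no version number was found. — e.g. on getVersionNum(""): A returns some [], B returns none
import Mathlib
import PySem

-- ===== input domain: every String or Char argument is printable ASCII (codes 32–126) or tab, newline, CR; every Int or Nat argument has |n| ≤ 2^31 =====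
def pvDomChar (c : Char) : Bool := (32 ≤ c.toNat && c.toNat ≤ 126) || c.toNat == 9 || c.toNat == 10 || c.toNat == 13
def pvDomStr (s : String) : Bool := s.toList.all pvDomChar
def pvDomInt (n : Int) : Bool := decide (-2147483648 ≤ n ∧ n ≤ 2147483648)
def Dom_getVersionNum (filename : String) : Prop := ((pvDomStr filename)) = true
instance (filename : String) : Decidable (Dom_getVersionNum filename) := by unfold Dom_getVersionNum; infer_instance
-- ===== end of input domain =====

-- B replaces A's backward scan with negative indexing, early break and a final
-- reverse by one forward pass that resets a digit buffer at each non-digit (objective: simpler);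
-- on the empty string A returns [] while B returns none (stated in D_ below).

-- ===== PORT A =====
-- A's loop 'for i in range(len(filename))' with early returns/break; `int(char)`
-- is ported by hand as c.toNat - 48, exact because char.isdigit() holds there (ASCII digit).
def pvA_loop (cs : List Char) (n i : Nat) (number : List Int) : Option (List Int) :=
  if i < n then
    match PySem.List.pyGet? cs (-(i : Int) - 1) with
    | none => none  -- unreachable: i < len(cs)
    | some c =>
      if PySem.Chars.isdigit c then
        pvA_loop cs n (i + 1) (number ++ [(c.toNat : Int) - 48])
      else if i = 0 then none
      else some number
  else some number
termination_by n - i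

def getVersionNum (filename : String) : Option (List Int) :=
  match pvA_loop filename.toList filename.toList.length 0 [] with
  | none => none
  | some number => some number.reverse

-- ===== PORT B =====
def pvB_step (buf : List Int) (c : Char) : List Int :=
  if PySem.Chars.isdigit c then buf ++ [(c.toNat : Int) - 48] else []

-- 'return buf or None'
def getVersionNum_alt (filename : String) : Option (List Int) :=
  let buf := filename.toList.foldl pvB_step []
  if buf ≠ [] then some buf else none

-- ===== PRECONDITION & SPEC =====
-- On the empty string A returns [] (its loop never runs) although every other string
-- without a trailing digit yields None; B uniformly returns None when there is no
-- trailing digit run, the intended signal that no version number was found.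
def D_getVersionNum (filename : String) : Prop := filename = ""
instance (filename : String) : Decidable (D_getVersionNum filename) := by unfold D_getVersionNum; infer_instance

def Spec_getVersionNum (filename : String) (out : Option (List Int)) : Prop := ¬ D_getVersionNum filename → out = getVersionNum_alt filename
instance (filename : String) (out : Option (List Int)) : Decidable (Spec_getVersionNum filename out) := by unfold Spec_getVersionNum; infer_instance

def pvDiffWitness_getVersionNum : String := ""
def pvDiffWitnessOut_getVersionNum : (Option (List Int)) × (Option (List Int)) := (some [], none)

-- ===== CLAIM (what is proved, stated in full; the proofs are below) =====
def Claim_unchanged_getVersionNum : Prop := ∀ (filename : String), Dom_getVersionNum filename → Spec_getVersionNum filename (getVersionNum filename)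
def Claim_changed_getVersionNum : Prop := Dom_getVersionNum (pvDiffWitness_getVersionNum) ∧ D_getVersionNum (pvDiffWitness_getVersionNum) ∧ getVersionNum (pvDiffWitness_getVersionNum) = pvDiffWitnessOut_getVersionNum.1 ∧ getVersionNum_alt (pvDiffWitness_getVersionNum) = pvDiffWitnessOut_getVersionNum.2 ∧ pvDiffWitnessOut_getVersionNum.1 ≠ pvDiffWitnessOut_getVersionNum.2
def Claim_exact_getVersionNum : Prop := ∀ (filename : String), Dom_getVersionNum filename → D_getVersionNum filename → getVersionNum filename ≠ getVersionNum_alt filename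

-- ===== LEMMAS AND PROOFS =====

-- B's fold: buffer after the whole pass = (previous buffer if all digits, else []) ++ digits of the maximal digit suffix
theorem pvB_fold_char (cs : List Char) : ∀ buf,
    cs.foldl pvB_step buf =
      (if cs.all PySem.Chars.isdigit then buf else []) ++
        ((cs.reverse.takeWhile PySem.Chars.isdigit).reverse).map (fun c => (c.toNat : Int) - 48) := by
  induction cs using List.reverseRecOn with
  | nil => simp
  | append_singleton cs c ih =>
    intro buf
    rw [List.foldl_append]
    simp only [List.foldl_cons, List.foldl_nil, pvB_step, List.reverse_append,
      List.reverse_cons, List.reverse_nil, List.nil_append, List.cons_append,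
      List.all_append, List.all_cons, List.all_nil]
    by_cases hc : PySem.Chars.isdigit c
    · simp [hc, ih buf, Bool.and_true]
    · simp [hc]

-- A's loop from a positive index just appends the remaining digit run (read off the reversed list)
theorem pvA_loop_pos (cs : List Char) : ∀ i acc, 0 < i → i ≤ cs.length →
    pvA_loop cs cs.length i acc =
      some (acc ++ ((cs.reverse.drop i).takeWhile PySem.Chars.isdigit).map (fun c => (c.toNat : Int) - 48)) := by
  intro i acc hpos hle
  induction h : cs.length - i generalizing i acc with
  | zero =>
    rw [pvA_loop, if_neg (by omega)]
    have hnil : cs.reverse.drop i = [] := List.drop_eq_nil_of_le (by simp; omega)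
    simp [hnil]
  | succ k ih =>
    have hlt : i < cs.length := by omega
    have hlt' : i < cs.reverse.length := by simpa using hlt
    rw [pvA_loop, if_pos hlt]
    have hget : PySem.List.pyGet? cs (-(i : Int) - 1) = some (cs.reverse[i]'hlt') := by
      rw [show (-(i : Int) - 1) = -(((i + 1 : Nat)) : Int) by push_cast; ring,
        PySem.List.pyGet?_neg_natCast cs (i+1) (by omega) (by omega)]
      rw [show cs.length - (i+1) = cs.length - 1 - i by omega, ← List.getElem?_reverse hlt,
        List.getElem?_eq_getElem hlt']
    rw [hget]
    have hdrop : cs.reverse.drop i = cs.reverse[i]'hlt' :: cs.reverse.drop (i + 1) :=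
      List.drop_eq_getElem_cons hlt'
    by_cases hd : PySem.Chars.isdigit (cs.reverse[i]'hlt')
    · simp only [hd, reduceIte]
      rw [ih (i+1) _ (by omega) (by omega) (by omega), hdrop, List.takeWhile_cons, hd]
      simp
    · simp only [hd, Bool.false_eq_true, reduceIte, if_neg (show ¬ i = 0 by omega)]
      have hd' : PySem.Chars.isdigit (cs.reverse[i]'hlt') = false := by simpa using hd
      rw [hdrop, List.takeWhile_cons, hd']
      simp

-- A's loop from index 0, for a nonempty string (last char a = head of the reversed list)
theorem pvA_closed (cs : List Char) (a : Char) (t : List Char) (hR : cs.reverse = a :: t) :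
    pvA_loop cs cs.length 0 [] =
      if PySem.Chars.isdigit a then
        some (((a :: t).takeWhile PySem.Chars.isdigit).map (fun c => (c.toNat : Int) - 48))
      else none := by
  have hlen : 0 < cs.length := by
    have : 0 < cs.reverse.length := by rw [hR]; simp
    simpa using this
  rw [pvA_loop, if_pos hlen]
  have hget : PySem.List.pyGet? cs (-((0 : Nat) : Int) - 1) = some a := by
    rw [show (-((0 : Nat) : Int) - 1) = (-1 : Int) by norm_num, PySem.List.pyGet?_neg_one,
      List.getLast?_eq_head?_reverse, hR]
    rfl
  rw [hget]
  by_cases hd : PySem.Chars.isdigit a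
  · simp only [hd, reduceIte, Nat.reduceAdd]
    rw [pvA_loop_pos cs 1 _ (by omega) (by omega)]
    have ht : cs.reverse.drop 1 = t := by rw [hR]; rfl
    rw [ht, List.takeWhile_cons, hd]
    simp
  · simp [hd]

theorem getVersionNum_eq_alt (filename : String) (hne : filename ≠ "") :
    getVersionNum filename = getVersionNum_alt filename := by
  unfold getVersionNum getVersionNum_alt
  set cs := filename.toList with hcs
  have hne' : cs ≠ [] := by
    rw [hcs]; simpa using hne
  cases hR : cs.reverse with
  | nil =>
    exact absurd (by simpa using congrArg List.reverse hR) hne'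
  | cons a t =>
    have hB : cs.foldl pvB_step [] =
        (((a :: t).takeWhile PySem.Chars.isdigit).reverse).map (fun c => (c.toNat : Int) - 48) := by
      rw [pvB_fold_char, hR]
      split <;> simp
    rw [pvA_closed cs a t hR, hB]
    by_cases hd : PySem.Chars.isdigit a
    · have htw : (a :: t).takeWhile PySem.Chars.isdigit = a :: t.takeWhile PySem.Chars.isdigit := by
        rw [List.takeWhile_cons, hd]; norm_num
      rw [if_pos hd]
      simp only [htw]
      rw [if_pos (by simp)]
      simp [List.map_reverse]
    · have htw : (a :: t).takeWhile PySem.Chars.isdigit = [] := by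
        rw [List.takeWhile_cons]
        simp [hd]
      rw [if_neg hd]
      simp [htw]

-- ===== VERDICT (by name: the statement is the Claim_ definition above) =====
theorem getVersionNum_spec : Claim_unchanged_getVersionNum := by
  intro filename _ hD
  exact getVersionNum_eq_alt filename hD

theorem getVersionNum_changed : Claim_changed_getVersionNum := by
  unfold Claim_changed_getVersionNum
  refine ⟨by decide, rfl, ?_, by decide, by decide⟩
  rw [pvDiffWitness_getVersionNum, getVersionNum,
    show ("" : String).toList = [] from rfl, pvA_loop]
  norm_num [pvDiffWitnessOut_getVersionNum]

theorem getVersionNum_tight : Claim_exact_getVersionNum := by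
  intro filename _ hD
  rw [D_getVersionNum] at hD
  subst hD
  rw [getVersionNum, show ("" : String).toList = [] from rfl, pvA_loop]
  norm_num [getVersionNum_alt]
  decide
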